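-- pv_equiv track=rewrite | github.com/atlanhq/application-sdk | ui/pages/telemetry.py | sum_each_index
-- ===== SOURCE A (Python) =====
-- def sum_each_index(list_of_lists):
--   """Sums the elements at each index across all sublists."""
--
--   result = []
--   if not list_of_lists:
--     return result
--
--   max_length = max(len(sublist) for sublist in list_of_lists)
--
--   for i in range(max_length):
--     index_sum = 0
--     for sublist in list_of_lists:
--       if i < len(sublist):
--         index_sum += int(sublist[i])
--     result.append(index_sum)
--
--   return result
-- ===== SOURCE B (Python) =====
-- def sum_each_index(list_of_lists):
--   """Sums the elements at each index across all sublists."""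
--
--   result = []
--   for sublist in list_of_lists:
--     for j, x in enumerate(sublist):
--       if j < len(result):
--         result[j] += int(x)
--       else:
--         result.append(int(x))
--   return result
-- ===== Notes on version B (the rewrite author's own statement) =====
-- stated objective: simpler
-- what changed: One pass that merges each sublist into the running column sums (growing the result as needed), instead of precomputing max_length and rescanning all sublists once per column index.
import Mathlib
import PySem

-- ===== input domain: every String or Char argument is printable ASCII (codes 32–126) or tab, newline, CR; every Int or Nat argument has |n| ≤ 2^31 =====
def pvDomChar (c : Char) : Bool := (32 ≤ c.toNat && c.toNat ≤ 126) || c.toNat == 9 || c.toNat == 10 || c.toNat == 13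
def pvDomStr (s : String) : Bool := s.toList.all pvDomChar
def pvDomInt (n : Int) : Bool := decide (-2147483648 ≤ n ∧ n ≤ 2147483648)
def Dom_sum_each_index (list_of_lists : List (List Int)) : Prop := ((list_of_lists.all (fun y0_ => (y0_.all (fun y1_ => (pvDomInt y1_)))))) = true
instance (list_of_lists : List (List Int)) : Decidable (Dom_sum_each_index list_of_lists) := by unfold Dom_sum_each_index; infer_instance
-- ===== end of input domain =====

-- B replaces A's column-by-column rescan of all sublists with a single pass that
-- merges each sublist into the running column sums (objective: simpler, one visit per element).

-- ===== PORT A =====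
-- int(sublist[i]) on an element that is already an int is the identity, so it is omitted.
def sum_each_index (list_of_lists : List (List Int)) : List Int :=
  if list_of_lists = [] then []
  else
    -- max(len(sublist) for sublist in list_of_lists): Python's max = fold of max seeded with the first item
    let maxLen : Nat :=
      match list_of_lists.map List.length with
      | [] => 0   -- unreachable: list_of_lists ≠ []
      | h :: t => t.foldl max h
    (List.range maxLen).foldl
      (fun result i =>
        result ++ [list_of_lists.foldl
          (fun index_sum sublist =>
            if i < sublist.length then index_sum + sublist.getD i 0 else index_sum) 0])
      []

-- ===== PORT B =====
-- inner loop body of Source B: enumerate indices are ≥ 0, so .toNat on them is exact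
def pvRowStep (r : List Int) (jx : Int × Int) : List Int :=
  if jx.1 < (r.length : Int) then r.set jx.1.toNat (r.getD jx.1.toNat 0 + jx.2)
  else r ++ [jx.2]

def sum_each_index_alt (list_of_lists : List (List Int)) : List Int :=
  list_of_lists.foldl
    (fun result sublist => (PySem.List.enumerate sublist 0).foldl pvRowStep result)
    []

-- ===== PRECONDITION & SPEC =====
def Spec_sum_each_index (list_of_lists : List (List Int)) (out : List Int) : Prop := out = sum_each_index_alt list_of_lists
instance (list_of_lists : List (List Int)) (out : List Int) : Decidable (Spec_sum_each_index list_of_lists out) := by unfold Spec_sum_each_index; infer_instance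

-- ===== CLAIM (what is proved, stated in full; the proofs are below) =====
def Claim_equal_sum_each_index : Prop := ∀ (list_of_lists : List (List Int)), Dom_sum_each_index list_of_lists → Spec_sum_each_index list_of_lists (sum_each_index list_of_lists)

-- ===== LEMMAS AND PROOFS =====

-- clean zip-with-padding merge; B's inner fold computes exactly this
def mergeL : List Int → List Int → List Int
  | [], sub => sub
  | a, [] => a
  | a :: as_, b :: bs => (a + b) :: mergeL as_ bs

lemma mergeL_nil_right (a : List Int) : mergeL a [] = a := by
  cases a <;> rfl

lemma length_mergeL (a b : List Int) : (mergeL a b).length = max a.length b.length := by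
  induction a generalizing b with
  | nil => simp [mergeL]
  | cons x xs ih =>
      cases b with
      | nil => simp [mergeL]
      | cons y ys => simp only [mergeL, List.length_cons, ih]; omega


lemma getD_mergeL (a b : List Int) (i : Nat) :
    (mergeL a b).getD i 0 = a.getD i 0 + b.getD i 0 := by
  induction a generalizing b i with
  | nil => simp [mergeL]
  | cons x xs ih =>
      cases b with
      | nil => simp [mergeL]
      | cons y ys =>
          cases i with
          | zero => simp [mergeL]
          | succ n => simpa [mergeL] using ih ys n

-- B's inner fold over enumerate realises mergeL (invariant over the start index k)
lemma rowFold_eq (sub : List Int) (k : Nat) (r : List Int) (hk : k ≤ r.length) :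
    (PySem.List.enumerate sub (k : Int)).foldl pvRowStep r
      = r.take k ++ mergeL (r.drop k) sub := by
  induction sub generalizing k r with
  | nil => simp [PySem.List.enumerate_nil, mergeL_nil_right]
  | cons x xs ih =>
      rw [PySem.List.enumerate_cons]
      simp only [List.foldl_cons]
      rcases Nat.lt_or_ge k r.length with hlt | hge
      · have hstep : pvRowStep r ((k : Int), x)
            = r.set k (r.getD k 0 + x) := by
          simp [pvRowStep, hlt]
        have hk1 : k + 1 ≤ (r.set k (r.getD k 0 + x)).length := by
          simp; omega
        have hcast : ((k : Int) + 1) = ((k + 1 : Nat) : Int) := by push_cast; ring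
        rw [hstep, hcast, ih (k+1) _ hk1]
        have hdrop : r.drop k = r[k] :: r.drop (k+1) :=
          List.drop_eq_getElem_cons hlt
        rw [hdrop]
        have htake : (r.set k (r.getD k 0 + x)).take (k+1)
            = r.take k ++ [r[k] + x] := by
          rw [List.take_add_one, List.take_set,
              List.set_eq_of_length_le (by simp [List.length_take])]
          congr 1
          simp [hlt]
        have hdrop2 : (r.set k (r.getD k 0 + x)).drop (k+1) = r.drop (k+1) := by
          rw [List.drop_set]
          simp
        rw [htake, hdrop2, mergeL]
        simp
      · have hk' : k = r.length := le_antisymm hk hge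
        have hstep : pvRowStep r ((k : Int), x) = r ++ [x] := by
          simp [pvRowStep, hk']
        have hk1 : k + 1 ≤ (r ++ [x]).length := by simp [hk']
        have hcast : ((k : Int) + 1) = ((k + 1 : Nat) : Int) := by push_cast; ring
        rw [hstep, hcast, ih (k+1) _ hk1]
        subst hk'
        rw [List.take_of_length_le (by simp), List.drop_eq_nil_of_le (by simp)]
        simp [List.take_of_length_le, List.drop_eq_nil_of_le, mergeL]

lemma rowFold_eq_mergeL (r sub : List Int) :
    (PySem.List.enumerate sub 0).foldl pvRowStep r = mergeL r sub := by
  have := rowFold_eq sub 0 r (Nat.zero_le _)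
  simpa using this

-- hence B = fold of mergeL
lemma alt_foldl_aux (ls : List (List Int)) (acc : List Int) :
    ls.foldl (fun result sublist =>
        (PySem.List.enumerate sublist 0).foldl pvRowStep result) acc
      = ls.foldl mergeL acc := by
  induction ls generalizing acc with
  | nil => rfl
  | cons h t ih => simp only [List.foldl_cons, rowFold_eq_mergeL]

lemma alt_eq_foldl_mergeL (ls : List (List Int)) :
    sum_each_index_alt ls = ls.foldl mergeL [] := by
  unfold sum_each_index_alt
  exact alt_foldl_aux ls []

-- length of B's result = fold of max of lengths
lemma length_foldl_mergeL (ls : List (List Int)) (acc : List Int) :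
    (ls.foldl mergeL acc).length = ls.foldl (fun n s => max n s.length) acc.length := by
  induction ls generalizing acc with
  | nil => rfl
  | cons h t ih => simp only [List.foldl_cons, ih, length_mergeL]

-- columns of B's result = plain column sums
lemma getD_foldl_mergeL (ls : List (List Int)) (acc : List Int) (i : Nat) :
    (ls.foldl mergeL acc).getD i 0
      = ls.foldl (fun s sub => s + sub.getD i 0) (acc.getD i 0) := by
  induction ls generalizing acc with
  | nil => rfl
  | cons h t ih => simp only [List.foldl_cons, ih, getD_mergeL]

-- A's guarded column sum = the plain one (out-of-range getD is 0)
lemma guarded_col_eq (ls : List (List Int)) (i : Nat) (s : Int) :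
    ls.foldl (fun index_sum sub =>
        if i < sub.length then index_sum + sub.getD i 0 else index_sum) s
      = ls.foldl (fun t sub => t + sub.getD i 0) s := by
  induction ls generalizing s with
  | nil => rfl
  | cons h t ih =>
      simp only [List.foldl_cons]
      rcases Nat.lt_or_ge i h.length with hlt | hge
      · rw [if_pos hlt, ih]
      · rw [if_neg (by omega), List.getD_eq_default _ _ hge, add_zero, ih]

-- A's append-fold is a map over range
lemma foldl_append_map (l : List Nat) (f : Nat → Int) (acc : List Int) :
    l.foldl (fun r i => r ++ [f i]) acc = acc ++ l.map f := by
  induction l generalizing acc with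
  | nil => simp
  | cons h t ih => simp [ih]

-- Python's max (seeded with the first item) = fold of max seeded with 0, over Nats
lemma foldl_max_map (t : List (List Int)) (n : Nat) :
    (t.map List.length).foldl max n = t.foldl (fun m s => max m s.length) n := by
  induction t generalizing n with
  | nil => rfl
  | cons h tl ih => simp only [List.map_cons, List.foldl_cons, ih]

-- ===== VERDICT (by name: the statement is the Claim_ definition above) =====
theorem sum_each_index_spec : Claim_equal_sum_each_index := by
  intro ls _
  show sum_each_index ls = sum_each_index_alt ls
  rw [alt_eq_foldl_mergeL]
  unfold sum_each_index
  cases ls with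
  | nil => simp
  | cons h t =>
      rw [if_neg (by simp)]
      simp only [List.map_cons]
      set maxLen := (t.map List.length).foldl max h.length with hm
      have hmax : maxLen = ((h :: t).foldl mergeL []).length := by
        rw [length_foldl_mergeL]
        simp only [List.foldl_cons, List.length_nil, hm, foldl_max_map, Nat.zero_max]
      rw [foldl_append_map]
      apply List.ext_getElem
      · simpa using hmax
      · intro i hi1 hi2
        simp only [List.nil_append, List.getElem_map, List.getElem_range]
        rw [guarded_col_eq]
        have hi : i < ((h :: t).foldl mergeL []).length := by
          simpa [hmax] using hi1
        rw [← List.getD_eq_getElem _ 0 hi, getD_foldl_mergeL]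
        rfl
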